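-- pv_equiv track=rewrite | github.com/johnwroge/DSA | Algorithms/mathematical-algorithms/gcd-lcm.py | count_pairs_with_gcd
-- ===== SOURCE A (Python) =====
-- from typing import List
--
-- def gcd(a: int, b: int) -> int:
--     """
--     Calculate Greatest Common Divisor using Euclidean algorithm
--     Time Complexity: O(log(min(a, b)))
--     Space Complexity: O(1)
--     """
--     while b:
--         a, b = b, a % b
--     return a
--
-- def count_pairs_with_gcd(nums: List[int], target_gcd: int) -> int:
--     """
--     Count pairs (i, j) where gcd(nums[i], nums[j]) == target_gcd
--     """
--     count = 0
--     n = len(nums)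
--
--     for i in range(n):
--         for j in range(i + 1, n):
--             if gcd(nums[i], nums[j]) == target_gcd:
--                 count += 1
--
--     return count
-- ===== SOURCE B (Python) =====
-- def gcd(a, b):
--     while b:
--         a, b = b, a % b
--     return a
--
-- def count_pairs_with_gcd(nums, target_gcd):
--     # Single left-to-right pass keeping a frequency table of the values seen
--     # so far: each element is matched once against every distinct earlier
--     # value, weighted by its multiplicity.
--     count = 0
--     seen = {}
--     for y in nums:
--         for x, c in seen.items():
--             if gcd(x, y) == target_gcd:
--                 count += c
--         seen[y] = seen.get(y, 0) + 1
--     return count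
-- ===== Notes on version B (the rewrite author's own statement) =====
-- stated objective: alternative
-- what changed: Replaces the nested index double-loop over all pairs by a single left-to-right pass that keeps a frequency dictionary of the values seen so far and matches each element once per distinct earlier value, weighted by multiplicity.
import Mathlib
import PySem

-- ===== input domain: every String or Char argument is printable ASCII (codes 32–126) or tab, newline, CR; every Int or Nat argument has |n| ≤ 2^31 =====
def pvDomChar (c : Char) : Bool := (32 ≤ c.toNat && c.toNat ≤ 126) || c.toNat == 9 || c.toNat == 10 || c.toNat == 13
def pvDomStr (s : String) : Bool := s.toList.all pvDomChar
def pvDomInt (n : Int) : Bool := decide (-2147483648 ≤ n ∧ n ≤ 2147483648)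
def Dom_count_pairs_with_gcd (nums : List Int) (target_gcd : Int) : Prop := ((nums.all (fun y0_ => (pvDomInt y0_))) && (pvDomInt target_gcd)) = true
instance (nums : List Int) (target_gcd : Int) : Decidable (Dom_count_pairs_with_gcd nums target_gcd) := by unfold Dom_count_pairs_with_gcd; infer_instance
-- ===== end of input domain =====

-- B replaces A's nested index double-loop over all pairs by one left-to-right pass that keeps a
-- frequency dictionary of the values seen so far and matches each element once per distinct
-- earlier value, weighted by multiplicity (objective: alternative; no speedup is claimed).

-- ===== PORT A =====

-- needed for the termination of pygcd (cited in decreasing_by)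
theorem pymod_natAbs_lt (a : Int) {b : Int} (hb : ¬ b = 0) :
    (PySem.Int.mod a b).natAbs < b.natAbs := by
  rcases lt_or_gt_of_ne hb with h | h
  · have := PySem.Int.mod_neg_bounds a h; omega
  · have h1 := PySem.Int.mod_nonneg a h
    have h2 := PySem.Int.mod_lt a h; omega

-- the module's hand-rolled gcd (identical in Source A and Source B): while b: a, b = b, a % b; return a
def pygcd (a b : Int) : Int :=
  if h : b = 0 then a else pygcd b (PySem.Int.mod a b)
termination_by b.natAbs
decreasing_by exact pymod_natAbs_lt a h

-- A's double loop; every index produced by range is in bounds, so pyGetD's default 0 is never used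
def count_pairs_with_gcd (nums : List Int) (target_gcd : Int) : Int :=
  let n := PySem.List.len nums
  (PySem.List.pyRange 0 n).foldl (fun count i =>
    (PySem.List.pyRange (i + 1) n).foldl (fun count j =>
      if pygcd (PySem.List.pyGetD nums i 0) (PySem.List.pyGetD nums j 0) = target_gcd
      then count + 1 else count) count) 0

-- ===== PORT B =====

-- one pass, state = (count, frequency dictionary of earlier values)
def count_pairs_with_gcd_alt (nums : List Int) (target_gcd : Int) : Int :=
  (nums.foldl (fun (s : Int × PySem.Dict Int Int) y =>
    (s.2.items.foldl (fun c p => if pygcd p.1 y = target_gcd then c + p.2 else c) s.1,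
     s.2.insert y (s.2.getD y 0 + 1))) (0, PySem.Dict.empty)).1

-- ===== PRECONDITION & SPEC =====
def Spec_count_pairs_with_gcd (nums : List Int) (target_gcd : Int) (out : Int) : Prop := out = count_pairs_with_gcd_alt nums target_gcd
instance (nums : List Int) (target_gcd : Int) (out : Int) : Decidable (Spec_count_pairs_with_gcd nums target_gcd out) := by unfold Spec_count_pairs_with_gcd; infer_instance

-- ===== CLAIM (what is proved, stated in full; the proofs are below) =====
def Claim_equal_count_pairs_with_gcd : Prop := ∀ (nums : List Int) (target_gcd : Int), Dom_count_pairs_with_gcd nums target_gcd → Spec_count_pairs_with_gcd nums target_gcd (count_pairs_with_gcd nums target_gcd)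

-- ===== LEMMAS AND PROOFS =====

-- the structural count of A: for each head, matches against the rest of the list
def aspec (t : Int) : List Int → Int
  | [] => 0
  | x :: r => (r.countP (fun y => decide (pygcd x y = t)) : Int) + aspec t r

-- the per-position count of B: matches of each element against the prefix before it
def cross (t : Int) (pre rest : List Int) : Int :=
  match rest with
  | [] => 0
  | y :: r => (pre.countP (fun x => decide (pygcd x y = t)) : Int) + cross t (pre ++ [y]) r

-- countP of pre splits into the k-part and the non-k part
theorem split_count (P : Int → Bool) (k : Int) : ∀ (pre : List Int),
    pre.countP P = (if P k then pre.count k else 0) + (pre.filter (fun x => !(x == k))).countP P := by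
  intro pre
  induction pre with
  | nil => simp
  | cons a r ih =>
    by_cases hak : a = k
    · subst hak
      simp only [List.countP_cons, List.count_cons_self, List.filter_cons, beq_self_eq_true,
        Bool.not_true]
      rw [ih]
      by_cases hP : P a <;> simp [hP] <;> omega
    · simp only [List.countP_cons, List.count_cons, List.filter_cons,
        show (a == k) = false by simp [hak], Bool.not_false, if_true, cond_true]
      rw [ih]
      by_cases hP : P a <;> by_cases hPk : P k <;> simp [hP, hPk, List.countP_cons] <;> omega

-- sum over a nodup list covering pre of (count in pre when P holds) = countP over pre
theorem sum_ite_count (Q : Int → Prop) [DecidablePred Q] : ∀ (s pre : List Int),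
    s.Nodup → (∀ x ∈ pre, x ∈ s) →
    ((s.map (fun k => if Q k then (pre.count k : Int) else 0)).sum)
      = (pre.countP (fun x => decide (Q x)) : Int) := by
  intro s
  induction s with
  | nil =>
    intro pre _ hcov
    have : pre = [] := List.eq_nil_iff_forall_not_mem.mpr (fun x hx => by simpa using hcov x hx)
    simp [this]
  | cons k s' ih =>
    intro pre hnd hcov
    have hk : k ∉ s' := (List.nodup_cons.mp hnd).1
    have hnd' : s'.Nodup := (List.nodup_cons.mp hnd).2
    have hcov' : ∀ x ∈ pre.filter (fun x => !(x == k)), x ∈ s' := by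
      intro x hx
      have hxp : x ∈ pre := List.mem_of_mem_filter hx
      have hxk : ¬ (x == k) = true := by simpa using List.of_mem_filter hx
      rcases List.mem_cons.mp (hcov x hxp) with h | h
      · exact absurd (by simp [h]) hxk
      · exact h
    have hcnt : ∀ x ∈ s', pre.count x = (pre.filter (fun x => !(x == k))).count x := by
      intro x hx
      have hxk : x ≠ k := fun h => hk (h ▸ hx)
      rw [List.count_filter (by simp [hxk])]
    have hmap : s'.map (fun k' => if Q k' then (pre.count k' : Int) else 0)
        = s'.map (fun k' => if Q k' then ((pre.filter (fun x => !(x == k))).count k' : Int) else 0) := by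
      apply List.map_congr_left
      intro x hx
      rw [hcnt x hx]
    rw [List.map_cons, List.sum_cons, hmap, ih _ hnd' hcov',
      split_count (fun x => decide (Q x)) k pre]
    push_cast
    by_cases hQ : Q k <;> simp [hQ]

-- a fold adding p.2 on a test of p.1 is the starting value plus a sum
theorem foldl_pair_if (Q : Int → Prop) [DecidablePred Q] : ∀ (l : List (Int × Int)) (c : Int),
    l.foldl (fun acc p => if Q p.1 then acc + p.2 else acc) c
      = c + (l.map (fun p => if Q p.1 then p.2 else 0)).sum := by
  intro l
  induction l with
  | nil => simp
  | cons p r ih =>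
    intro c
    simp only [List.foldl_cons, List.map_cons, List.sum_cons]
    rw [ih]
    split_ifs <;> ring

-- the python `seen[y] = seen.get(y, 0) + 1` advances the counter by one element
theorem counter_insert_getD (pre : List Int) (y : Int) :
    (PySem.Dict.counter pre).insert y ((PySem.Dict.counter pre).getD y 0 + 1)
      = PySem.Dict.counter (pre ++ [y]) := by
  rw [← PySem.Dict.foldl_insert_getD_add_one_eq_counter (pre ++ [y]), List.foldl_append,
    PySem.Dict.foldl_insert_getD_add_one_eq_counter]
  simp [List.foldl]

-- B's inner scan over the frequency dictionary adds exactly the number of hits in the prefix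
theorem Bstep (t y c : Int) (pre : List Int) :
    (PySem.Dict.counter pre).items.foldl (fun c p => if pygcd p.1 y = t then c + p.2 else c) c
    = c + (pre.countP (fun x => decide (pygcd x y = t)) : Int) := by
  rw [PySem.Dict.items_counter,
    foldl_pair_if (fun k => pygcd k y = t), List.map_map]
  have : ((fun p : Int × Int => if pygcd p.1 y = t then p.2 else 0) ∘
      fun k => (k, (pre.count k : Int)))
      = fun k => if pygcd k y = t then (pre.count k : Int) else 0 := by
    funext k; simp
  rw [this, sum_ite_count (fun k => pygcd k y = t)
    (PySem.Set.ofList pre) pre (PySem.Set.nodup_ofList pre)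
    (fun x hx => (PySem.Set.mem_ofList pre x).mpr hx)]

-- running B's loop from a prefix counter computes cross
theorem B_fold (t : Int) : ∀ (rest pre : List Int) (c : Int),
    (rest.foldl (fun (s : Int × PySem.Dict Int Int) y =>
      (s.2.items.foldl (fun c p => if pygcd p.1 y = t then c + p.2 else c) s.1,
       s.2.insert y (s.2.getD y 0 + 1))) (c, PySem.Dict.counter pre)).1
    = c + cross t pre rest := by
  intro rest
  induction rest with
  | nil => intro pre c; simp [cross]
  | cons y r ih =>
    intro pre c
    rw [List.foldl_cons]
    rw [show (((PySem.Dict.counter pre).items.foldl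
        (fun c p => if pygcd p.1 y = t then c + p.2 else c) c,
       (PySem.Dict.counter pre).insert y ((PySem.Dict.counter pre).getD y 0 + 1))
       : Int × PySem.Dict Int Int)
      = (c + (pre.countP (fun x => decide (pygcd x y = t)) : Int), PySem.Dict.counter (pre ++ [y])) by
        rw [Bstep, counter_insert_getD]]
    rw [ih (pre ++ [y])]
    simp [cross]
    ring

theorem cross_shift (t : Int) : ∀ (rest p : List Int),
    cross t p rest
      = ((rest.map (fun y => (p.countP (fun x => decide (pygcd x y = t)) : Int))).sum) + cross t [] rest := by
  intro rest
  induction rest with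
  | nil => intro p; simp [cross]
  | cons y r ih =>
    intro p
    rw [cross, ih (p ++ [y]), cross]
    simp only [List.nil_append]
    rw [ih [y]]
    have hsplit : (r.map (fun z => ((p ++ [y]).countP (fun x => decide (pygcd x z = t)) : Int))).sum
        = (r.map (fun z => (p.countP (fun x => decide (pygcd x z = t)) : Int))).sum
          + (r.map (fun z => (([y] : List Int).countP (fun x => decide (pygcd x z = t)) : Int))).sum := by
      rw [← List.sum_map_add]
      apply congrArg
      apply List.map_congr_left
      intro z _
      rw [List.countP_append]
      push_cast
      ring
    rw [hsplit, List.map_cons, List.sum_cons]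
    simp only [List.countP_nil, Nat.cast_zero]
    ring

theorem cross_nil_eq_aspec (t : Int) : ∀ (xs : List Int), cross t [] xs = aspec t xs := by
  intro xs
  induction xs with
  | nil => simp [cross, aspec]
  | cons x r ih =>
    rw [cross]
    simp only [List.nil_append]
    rw [cross_shift t r [x], ih, aspec]
    simp only [List.countP_nil, Nat.cast_zero, zero_add]
    congr 1
    have : ∀ z : Int, (([x] : List Int).countP (fun w => decide (pygcd w z = t)) : Int)
        = if decide (pygcd x z = t) then 1 else 0 := by
      intro z
      simp [List.countP_cons]
    rw [show (r.map (fun z => (([x] : List Int).countP (fun w => decide (pygcd w z = t)) : Int)))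
        = r.map (fun z => if decide (pygcd x z = t) then (1 : Int) else 0) by
      apply List.map_congr_left; intro z _; exact this z]
    rw [PySem.List.sum_map_ite_one_zero]

theorem B_eq_aspec (nums : List Int) (t : Int) :
    count_pairs_with_gcd_alt nums t = aspec t nums := by
  unfold count_pairs_with_gcd_alt
  rw [show (PySem.Dict.empty : PySem.Dict Int Int) = PySem.Dict.counter [] from rfl,
    B_fold t nums [] 0, cross_nil_eq_aspec]
  ring

-- ===== A-side =====

theorem A_eq_sum (nums : List Int) (t : Int) :
    count_pairs_with_gcd nums t
      = ((List.range nums.length).map (fun k =>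
          ((List.drop (k + 1) nums).countP (fun y => decide (pygcd (nums.getD k 0) y = t)) : Int))).sum := by
  unfold count_pairs_with_gcd
  simp only [PySem.List.len]
  rw [PySem.List.foldl_congr_mem (PySem.List.pyRange 0 (nums.length : Int)) _
    (fun acc i => acc + ((List.drop (i + 1).toNat nums).countP
      (fun y => decide (pygcd (PySem.List.pyGetD nums i 0) y = t)) : Int)) 0 ?_]
  · rw [PySem.List.pyRange_zero_natCast, List.foldl_map, PySem.List.foldl_add]
    rw [show ∀ l : List Nat, (l.map (fun k : Nat => ((List.drop ((k : Int) + 1).toNat nums).countP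
        (fun y => decide (pygcd (PySem.List.pyGetD nums (k : Int) 0) y = t)) : Int))).sum
        = (l.map (fun k => ((List.drop (k + 1) nums).countP
        (fun y => decide (pygcd (nums.getD k 0) y = t)) : Int))).sum from fun l => by
      apply congrArg
      apply List.map_congr_left
      intro k _
      rw [PySem.List.pyGetD_natCast, show ((k : Int) + 1).toNat = k + 1 by omega]]
    ring
  · intro acc i hi
    have h0 : (0 : Int) ≤ i := (PySem.List.mem_pyRange_one.mp hi).1
    rw [show (nums.length : Int) = PySem.List.len nums from rfl,
      PySem.List.foldl_pyRange_pyGetD nums 0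
        (fun c y => if pygcd (PySem.List.pyGetD nums i 0) y = t then c + 1 else c) acc (by omega),
      PySem.List.foldl_ite_add_one]

theorem sum_eq_aspec (t : Int) : ∀ (xs : List Int),
    ((List.range xs.length).map (fun k =>
      ((List.drop (k + 1) xs).countP (fun y => decide (pygcd (xs.getD k 0) y = t)) : Int))).sum
    = aspec t xs := by
  intro xs
  induction xs with
  | nil => simp [aspec]
  | cons x r ih =>
    rw [List.length_cons, List.range_succ_eq_map, List.map_cons, List.sum_cons, List.map_map]
    rw [show ((fun k => ((List.drop (k + 1) (x :: r)).countP
          (fun y => decide (pygcd ((x :: r).getD k 0) y = t)) : Int)) ∘ Nat.succ)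
        = fun k => ((List.drop (k + 1) r).countP (fun y => decide (pygcd (r.getD k 0) y = t)) : Int) by
      funext k
      simp only [Function.comp_apply, Nat.succ_eq_add_one, List.getD_cons_succ,
        List.drop_succ_cons]]
    rw [ih, aspec]
    simp

-- ===== VERDICT (by name: the statement is the Claim_ definition above) =====
theorem count_pairs_with_gcd_spec : Claim_equal_count_pairs_with_gcd := by
  intro nums t _
  unfold Spec_count_pairs_with_gcd
  rw [B_eq_aspec, A_eq_sum, sum_eq_aspec]
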